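-- pv_equiv track=rewrite | github.com/Justin-Akridge/pivotree | extract_pole.py | group_by_axis
-- ===== SOURCE A (Python) =====
-- def group_by_axis(coords, axis, tolerance):
--     grouped = []
--     current_group = []
--
--     # Sort the coordinates based on the specified axis
--     coords_sorted = sorted(coords, key=lambda x: x[axis])
--
--     # Iterate through the sorted coordinates
--     for point in coords_sorted:
--         if not current_group:  # If current group is empty, start a new one
--             current_group.append(point)
--         else:
--             # Calculate distance between the current point and the last point in the group
--             distance = abs(point[axis] - current_group[-1][axis])
--             if distance <= tolerance:
--                 current_group.append(point)  # Add point to current group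
--             else:
--                 grouped.append(current_group)  # Finish current group
--                 current_group = [point]  # Start a new group
--
--     # Add the last group to the list
--     if current_group:
--         grouped.append(current_group)
--
--     return grouped
-- ===== SOURCE B (Python) =====
-- def group_by_axis(coords, axis, tolerance):
--     if not coords:
--         return []
--     cs = sorted(coords, key=lambda p: p[axis])
--     n = len(cs)
--     cuts = [i for i in range(1, n) if abs(cs[i][axis] - cs[i - 1][axis]) > tolerance]
--     starts = [0] + cuts
--     stops = cuts + [n]
--     return [cs[a:b] for a, b in zip(starts, stops)]
-- ===== Notes on version B (the rewrite author's own statement) =====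
-- stated objective: alternative
-- what changed: B drops A's running current-group accumulator entirely: it computes the list of cut indices (positions where the sorted pairwise gap exceeds tolerance) as a filtered range, then partitions the sorted list in a separate pass by slicing between zipped consecutive boundaries.
import Mathlib
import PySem

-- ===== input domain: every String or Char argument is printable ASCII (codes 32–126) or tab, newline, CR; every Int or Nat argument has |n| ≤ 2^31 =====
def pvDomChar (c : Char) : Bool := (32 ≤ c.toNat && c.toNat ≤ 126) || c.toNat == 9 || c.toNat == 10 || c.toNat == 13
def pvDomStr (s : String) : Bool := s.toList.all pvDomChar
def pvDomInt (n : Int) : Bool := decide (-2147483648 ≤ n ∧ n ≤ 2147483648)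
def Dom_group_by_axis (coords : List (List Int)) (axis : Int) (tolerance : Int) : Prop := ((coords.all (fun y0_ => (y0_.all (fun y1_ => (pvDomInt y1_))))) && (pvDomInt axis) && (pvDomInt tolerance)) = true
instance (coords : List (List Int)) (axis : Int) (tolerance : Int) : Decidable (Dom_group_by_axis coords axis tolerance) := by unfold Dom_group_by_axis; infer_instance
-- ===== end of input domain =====

-- B replaces A's running current-group accumulator by staged passes: it computes the cut
-- indices (where the sorted pairwise gap exceeds tolerance) as a filtered range, then
-- partitions the sorted list by slicing between zipped boundaries. Equal on Pre_.

-- shared helper: the Python key/index access p[axis] (exact under Pre_)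
def axKey (axis : Int) (p : List Int) : Int := PySem.List.pyGetD p axis 0

-- ===== PORT A =====
def group_by_axis (coords : List (List Int)) (axis : Int) (tolerance : Int) : List (List (List Int)) :=
  let coords_sorted := PySem.List.sorted coords (fun x => axKey axis x) false
  let st := coords_sorted.foldl
    (fun (s : List (List (List Int)) × List (List Int)) point =>
      if s.2 = [] then (s.1, s.2 ++ [point])
      else
        let distance := |axKey axis point - axKey axis (PySem.List.pyGetD s.2 (-1) [])|
        if distance ≤ tolerance then (s.1, s.2 ++ [point])
        else (s.1 ++ [s.2], [point]))
    ([], [])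
  if st.2 = [] then st.1 else st.1 ++ [st.2]

-- ===== PORT B =====
def group_by_axis_alt (coords : List (List Int)) (axis : Int) (tolerance : Int) : List (List (List Int)) :=
  if coords = [] then []
  else
    let cs := PySem.List.sorted coords (fun p => axKey axis p) false
    let n : Int := (cs.length : Int)
    let cuts := (PySem.List.pyRange 1 n 1).filter
      (fun i => decide (tolerance <
        |axKey axis (PySem.List.pyGetD cs i []) - axKey axis (PySem.List.pyGetD cs (i - 1) [])|))
    let starts := 0 :: cuts
    let stops := cuts ++ [n]
    (starts.zip stops).map (fun ab => PySem.List.slice cs (some ab.1) (some ab.2))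

-- ===== PRECONDITION & SPEC =====
-- Pre_: axis must be a valid Python index into every point, else A raises IndexError.
def Pre_group_by_axis (coords : List (List Int)) (axis : Int) (tolerance : Int) : Prop :=
  ∀ p ∈ coords, -(p.length : Int) ≤ axis ∧ axis < (p.length : Int)
instance (coords : List (List Int)) (axis : Int) (tolerance : Int) : Decidable (Pre_group_by_axis coords axis tolerance) := by
  unfold Pre_group_by_axis; infer_instance

def pvWitness_group_by_axis : List (List Int) × Int × Int := ([[0, 9], [5, 1], [1, 2]], 0, 2)

def Spec_group_by_axis (coords : List (List Int)) (axis : Int) (tolerance : Int) (out : List (List (List Int))) : Prop := out = group_by_axis_alt coords axis tolerance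
instance (coords : List (List Int)) (axis : Int) (tolerance : Int) (out : List (List (List Int))) : Decidable (Spec_group_by_axis coords axis tolerance out) := by unfold Spec_group_by_axis; infer_instance

-- ===== CLAIM (what is proved, stated in full; the proofs are below) =====
def Claim_equal_group_by_axis : Prop := ∀ (coords : List (List Int)) (axis : Int) (tolerance : Int), Dom_group_by_axis coords axis tolerance → Pre_group_by_axis coords axis tolerance → Spec_group_by_axis coords axis tolerance (group_by_axis coords axis tolerance)

-- ===== LEMMAS AND PROOFS =====

-- Reference characterisation: groups are maximal chains of within-tolerance gaps.
def takeChain (axis tolerance : Int) (prev : List Int) : List (List Int) → (List (List Int)) × List (List Int)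
  | [] => ([], [])
  | y :: ys =>
      if |axKey axis y - axKey axis prev| ≤ tolerance then
        let t := takeChain axis tolerance y ys
        (y :: t.1, t.2)
      else ([], y :: ys)

theorem takeChain_snd_length (axis tolerance : Int) (prev : List Int) (l : List (List Int)) :
    (takeChain axis tolerance prev l).2.length ≤ l.length := by
  induction l generalizing prev with
  | nil => simp [takeChain]
  | cons y ys ih =>
      simp only [takeChain]
      split
      · exact le_trans (ih y) (Nat.le_succ _)
      · simp

def chop (axis tolerance : Int) : List (List Int) → List (List (List Int))
  | [] => []
  | x :: xs =>
      let t := takeChain axis tolerance x xs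
      (x :: t.1) :: chop axis tolerance t.2
  termination_by l => l.length
  decreasing_by
    simpa using Nat.lt_succ_of_le (takeChain_snd_length axis tolerance x xs)

theorem pyGetD_neg_one_getLast (cur : List (List Int)) (h : cur ≠ []) :
    PySem.List.pyGetD cur (-1) [] = cur.getLast h := by
  simp [PySem.List.pyGetD, PySem.List.pyGet?_neg_one, List.getLast?_eq_some_getLast h]

-- A's loop step and finalisation
def stepA (axis tolerance : Int) (s : List (List (List Int)) × List (List Int)) (point : List Int) :
    List (List (List Int)) × List (List Int) :=
  if s.2 = [] then (s.1, s.2 ++ [point])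
  else
    let distance := |axKey axis point - axKey axis (PySem.List.pyGetD s.2 (-1) [])|
    if distance ≤ tolerance then (s.1, s.2 ++ [point])
    else (s.1 ++ [s.2], [point])

def finA (st : List (List (List Int)) × List (List Int)) : List (List (List Int)) :=
  if st.2 = [] then st.1 else st.1 ++ [st.2]

-- main invariant of A's loop: with a nonempty current group, the remaining loop produces
-- exactly the chain extension of the current group's last element, then chops the rest
theorem loop_eq_chop (axis tolerance : Int) (pts : List (List Int)) :
    ∀ (grouped : List (List (List Int))) (cur : List (List Int)) (h : cur ≠ []),
    finA (pts.foldl (stepA axis tolerance) (grouped, cur)) =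
      grouped ++ (cur ++ (takeChain axis tolerance (cur.getLast h) pts).1) ::
        chop axis tolerance (takeChain axis tolerance (cur.getLast h) pts).2 := by
  induction pts with
  | nil =>
      intro grouped cur h
      simp [finA, takeChain, chop, h]
  | cons p ps ih =>
      intro grouped cur h
      simp only [List.foldl_cons, takeChain]
      have hstep : stepA axis tolerance (grouped, cur) p =
          if |axKey axis p - axKey axis (cur.getLast h)| ≤ tolerance
          then (grouped, cur ++ [p]) else (grouped ++ [cur], [p]) := by
        simp [stepA, h, pyGetD_neg_one_getLast cur h]
      rw [hstep]
      by_cases hd : |axKey axis p - axKey axis (cur.getLast h)| ≤ tolerance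
      · simp only [hd, if_pos]
        have hne : cur ++ [p] ≠ [] := by simp
        have hlast : (cur ++ [p]).getLast hne = p := by simp
        rw [ih grouped (cur ++ [p]) hne]
        simp [hlast]
      · simp only [hd, if_neg, not_false_iff]
        have hne : ([p] : List (List Int)) ≠ [] := by simp
        rw [ih (grouped ++ [cur]) [p] hne]
        have : chop axis tolerance (p :: ps) =
            (p :: (takeChain axis tolerance p ps).1) :: chop axis tolerance (takeChain axis tolerance p ps).2 := by
          simp [chop]
        simp [this]

theorem a_eq_chop (coords : List (List Int)) (axis : Int) (tolerance : Int) :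
    group_by_axis coords axis tolerance =
      chop axis tolerance (PySem.List.sorted coords (fun x => axKey axis x) false) := by
  unfold group_by_axis
  cases hs : PySem.List.sorted coords (fun x => axKey axis x) false with
  | nil => simp [chop]
  | cons x xs =>
      have h1 : stepA axis tolerance ([], []) x = ([], [x]) := by simp [stepA]
      have hfold : (x :: xs).foldl (stepA axis tolerance) ([], []) =
          xs.foldl (stepA axis tolerance) ([], [x]) := by
        simp [List.foldl_cons, h1]
      have hne : ([x] : List (List Int)) ≠ [] := by simp
      have := loop_eq_chop axis tolerance xs [] [x] hne
      simp only [List.getLast_singleton, List.nil_append, List.singleton_append] at this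
      show finA ((x :: xs).foldl (stepA axis tolerance) ([], [])) = chop axis tolerance (x :: xs)
      rw [hfold, this]
      simp [chop]

-- ===== B-side: the staged slicing view equals chop =====

def gapBig (axis tolerance : Int) (l : List (List Int)) (i : Int) : Bool :=
  decide (tolerance <
    |axKey axis (PySem.List.pyGetD l i []) - axKey axis (PySem.List.pyGetD l (i - 1) [])|)

def cutsOf (axis tolerance : Int) (l : List (List Int)) : List Int :=
  (PySem.List.pyRange 1 (l.length : Int) 1).filter (gapBig axis tolerance l)

def bView (axis tolerance : Int) (l : List (List Int)) : List (List (List Int)) :=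
  ((0 :: cutsOf axis tolerance l).zip (cutsOf axis tolerance l ++ [(l.length : Int)])).map
    (fun ab => PySem.List.slice l (some ab.1) (some ab.2))

theorem alt_eq_bView (coords : List (List Int)) (axis tolerance : Int) (h : coords ≠ []) :
    group_by_axis_alt coords axis tolerance =
      bView axis tolerance (PySem.List.sorted coords (fun p => axKey axis p) false) := by
  rw [group_by_axis_alt, if_neg h]
  rfl

-- specification of takeChain: it splits off a maximal within-tolerance chain
theorem takeChain_spec (axis tolerance : Int) (prev : List Int) (ys : List (List Int)) :
    ys = (takeChain axis tolerance prev ys).1 ++ (takeChain axis tolerance prev ys).2 ∧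
    List.IsChain (fun a b => |axKey axis b - axKey axis a| ≤ tolerance)
      (prev :: (takeChain axis tolerance prev ys).1) ∧
    (∀ b bs, (takeChain axis tolerance prev ys).2 = b :: bs →
      tolerance < |axKey axis b -
        axKey axis ((prev :: (takeChain axis tolerance prev ys).1).getLast (by simp))|) := by
  induction ys generalizing prev with
  | nil => simp [takeChain]
  | cons y ys ih =>
      by_cases hd : |axKey axis y - axKey axis prev| ≤ tolerance
      · obtain ⟨ih1, ih2, ih3⟩ := ih y
        refine ⟨?_, ?_, ?_⟩
        · simpa [takeChain, hd] using congrArg (y :: ·) ih1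
        · simp only [takeChain, hd, if_pos]
          exact List.isChain_cons_cons.mpr ⟨hd, ih2⟩
        · intro b bs hb
          simp only [takeChain, hd, if_pos] at hb ⊢
          have := ih3 b bs hb
          simp only [List.getLast_cons] at this ⊢
          exact this
      · refine ⟨by simp [takeChain, hd], by simp [takeChain, hd], ?_⟩
        intro b bs hb
        simp only [takeChain, hd, if_neg, not_false_iff] at hb ⊢
        injection hb with hb1 hb2
        subst hb1; subst hb2
        simpa using lt_of_not_ge hd

-- indexing into the left / right part of an append, through pyGetD
theorem pyGetD_append_left (c r : List (List Int)) (i : Int) (h0 : 0 ≤ i)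
    (h : i.toNat < c.length) :
    PySem.List.pyGetD (c ++ r) i [] = c.getD i.toNat [] := by
  rw [PySem.List.pyGetD_of_nonneg _ _ h0]
  simp [List.getD, List.getElem?_append_left h]

theorem pyGetD_append_right (c r : List (List Int)) (i : Int) (h0 : 0 ≤ i) :
    PySem.List.pyGetD (c ++ r) (i + (c.length : Int)) [] = PySem.List.pyGetD r i [] := by
  rw [PySem.List.pyGetD_of_nonneg _ _ (by omega), PySem.List.pyGetD_of_nonneg _ _ h0]
  have : (i + (c.length : Int)).toNat = c.length + i.toNat := by omega
  simp [this, List.getD, List.getElem?_append_right (Nat.le_add_right _ _)]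

-- decomposition of the cut list at a maximal chain boundary
theorem cutsOf_decomp (axis tolerance : Int) (c r : List (List Int)) (hc : c ≠ [])
    (hok : List.IsChain (fun a b => |axKey axis b - axKey axis a| ≤ tolerance) c)
    (hbd : ∀ b bs, r = b :: bs → tolerance < |axKey axis b - axKey axis (c.getLast hc)|) :
    cutsOf axis tolerance (c ++ r) =
      if r = [] then []
      else ((c.length : Int) :: (cutsOf axis tolerance r).map (· + (c.length : Int))) := by
  have hk1 : 1 ≤ (c.length : Int) := by
    have := List.length_pos_iff.mpr hc; omega
  have hsplit : PySem.List.pyRange 1 ((c ++ r).length : Int) 1 =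
      PySem.List.pyRange 1 (c.length : Int) 1 ++
      PySem.List.pyRange (c.length : Int) ((c ++ r).length : Int) 1 := by
    apply PySem.List.pyRange_one_append _ _ _ hk1
    simp
  -- inside the chain every gap is small
  have hchain : ∀ i ∈ PySem.List.pyRange 1 (c.length : Int) 1,
      gapBig axis tolerance (c ++ r) i = false := by
    intro i hi
    rw [PySem.List.mem_pyRange_one] at hi
    have h0 : 0 ≤ i := by omega
    have hlt : i.toNat < c.length := by omega
    have hlt' : (i - 1).toNat < c.length := by omega
    rw [gapBig, decide_eq_false_iff_not, not_lt,
      pyGetD_append_left c r i h0 hlt, pyGetD_append_left c r (i - 1) (by omega) hlt']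
    have hj : (i - 1).toNat + 1 < c.length := by omega
    have hstep := (List.isChain_iff_getElem.mp hok) ((i - 1).toNat) hj
    rw [← List.getD_eq_getElem c [] hj, ← List.getD_eq_getElem c [] (by omega)] at hstep
    rw [show i.toNat = (i - 1).toNat + 1 from by omega]
    exact hstep
  rw [cutsOf, hsplit, List.filter_append, List.filter_eq_nil_iff.mpr
    (fun i hi => by simp [hchain i hi])]
  cases r with
  | nil =>
      simp only [List.append_nil]
      rw [PySem.List.pyRange_one_eq_nil le_rfl]
      simp
  | cons b bs =>
      have hklt : (c.length : Int) < ((c ++ b :: bs).length : Int) := by simp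
      rw [PySem.List.pyRange_one_cons hklt]
      have hcut : gapBig axis tolerance (c ++ b :: bs) (c.length : Int) = true := by
        have h1 : PySem.List.pyGetD (c ++ b :: bs) (c.length : Int) [] = b := by
          have := pyGetD_append_right c (b :: bs) 0 le_rfl
          simpa using this
        have h2 : PySem.List.pyGetD (c ++ b :: bs) ((c.length : Int) - 1) [] = c.getLast hc := by
          rw [pyGetD_append_left c (b :: bs) _ (by omega) (by omega),
            show ((c.length : Int) - 1).toNat = c.length - 1 from by omega,
            List.getD_eq_getElem c [] (by omega), List.getLast_eq_getElem]
        rw [gapBig, decide_eq_true_iff, h1, h2]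
        exact hbd b bs rfl
      rw [List.filter_cons_of_pos hcut]
      -- the tail of the range is the shifted range of r
      have hrange : PySem.List.pyRange ((c.length : Int) + 1) ((c ++ b :: bs).length : Int) 1 =
          (PySem.List.pyRange 1 ((b :: bs).length : Int) 1).map (· + (c.length : Int)) := by
        rw [PySem.List.pyRange_one, PySem.List.pyRange_one, List.map_map]
        have hlen : (((c ++ b :: bs).length : Int) - ((c.length : Int) + 1)).toNat =
            (((b :: bs).length : Int) - 1).toNat := by simp
        rw [hlen]
        exact List.map_congr_left (fun k _ => by simp; ring)
      rw [hrange, List.filter_map]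
      simp only [List.nil_append]
      rw [if_neg (List.cons_ne_nil b bs)]
      congr 1
      rw [cutsOf]
      congr 1
      apply List.filter_congr
      intro j hj
      rw [PySem.List.mem_pyRange_one] at hj
      -- shift the two accesses
      simp only [Function.comp_apply, gapBig]
      have e1 : PySem.List.pyGetD (c ++ b :: bs) (j + (c.length : Int)) [] =
          PySem.List.pyGetD (b :: bs) j [] := pyGetD_append_right c (b :: bs) j (by omega)
      have e2 : PySem.List.pyGetD (c ++ b :: bs) (j + (c.length : Int) - 1) [] =
          PySem.List.pyGetD (b :: bs) (j - 1) [] := by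
        have : j + (c.length : Int) - 1 = (j - 1) + (c.length : Int) := by ring
        rw [this]
        exact pyGetD_append_right c (b :: bs) (j - 1) (by omega)
      rw [e1, e2]

-- every cut index is at least 1
theorem cutsOf_pos (axis tolerance : Int) (l : List (List Int)) :
    ∀ i ∈ cutsOf axis tolerance l, 1 ≤ i := by
  intro i hi
  rw [cutsOf, List.mem_filter] at hi
  exact ((PySem.List.mem_pyRange_one).mp hi.1).1

-- slicing an append at shifted nonnegative bounds reads the right part
theorem slice_append_shift (c r : List (List Int)) (a b : Int) (ha : 0 ≤ a) (hb : 0 ≤ b) :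
    PySem.List.slice (c ++ r) (some (a + (c.length : Int))) (some (b + (c.length : Int))) =
      PySem.List.slice r (some a) (some b) := by
  rw [PySem.List.slice_toNat _ (by omega) (by omega), PySem.List.slice_toNat _ ha hb]
  have h1 : (a + (c.length : Int)).toNat = c.length + a.toNat := by omega
  have h2 : (b + (c.length : Int)).toNat - (a + (c.length : Int)).toNat = b.toNat - a.toNat := by
    omega
  rw [h1]
  have h2' : (b + (c.length : Int)).toNat - (c.length + a.toNat) = b.toNat - a.toNat := by omega
  rw [h2', List.drop_length_add_append]

theorem bView_eq_chop (axis tolerance : Int) :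
    ∀ (m : Nat) (l : List (List Int)), l.length ≤ m → l ≠ [] →
      bView axis tolerance l = chop axis tolerance l := by
  intro m
  induction m with
  | zero => intro l hl hne; cases l <;> simp_all
  | succ m ih =>
      intro l hl hne
      cases l with
      | nil => exact absurd rfl hne
      | cons x xs =>
        obtain ⟨hsplit, hok, hbd⟩ := takeChain_spec axis tolerance x xs
        set t := takeChain axis tolerance x xs with ht
        have hl' : x :: xs = (x :: t.1) ++ t.2 := by simpa using congrArg (x :: ·) hsplit
        have hchop : chop axis tolerance (x :: xs) =
            (x :: t.1) :: chop axis tolerance t.2 := by simp [chop, ← ht]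
        have hcne : (x :: t.1) ≠ [] := by simp
        have hcuts := cutsOf_decomp axis tolerance (x :: t.1) t.2 hcne hok hbd
        rw [hl']
        rw [bView, hcuts]
        cases hr : t.2 with
        | nil =>
            rw [if_pos rfl]
            rw [hr] at hl' hchop
            rw [← hl', hchop]
            have hchopnil : chop axis tolerance [] = [] := by simp [chop]
            rw [hchopnil]
            simp only [List.nil_append, List.zip_cons_cons, List.zip_nil_right,
              List.map_cons, List.map_nil]
            congr 1
            rw [PySem.List.slice_zero_start, PySem.List.slice_to _ (by omega)]
            simp [hl']
        | cons b bs =>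
            have hrne : t.2 ≠ [] := by rw [hr]; simp
            rw [if_neg (List.cons_ne_nil b bs), ← hr]
            set k : Int := ((x :: t.1).length : Int) with hk
            set cr := cutsOf axis tolerance t.2 with hcr
            -- peel the first (0, k) pair; shift the rest
            have hzip : ((0 : Int) :: k :: cr.map (· + k)).zip ((k :: cr.map (· + k)) ++
                [(((x :: t.1) ++ t.2).length : Int)]) =
                (0, k) :: (((0 :: cr).zip (cr ++ [(t.2.length : Int)])).map
                  (Prod.map (· + k) (· + k))) := by
              rw [List.cons_append, List.zip_cons_cons]
              congr 1
              have hn : (((x :: t.1) ++ t.2).length : Int) = (t.2.length : Int) + k := by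
                simp [hk]; omega
              rw [hn, ← List.zip_map]
              simp
            rw [hzip, List.map_cons, List.map_map]
            have hchop2 : chop axis tolerance ((x :: t.1) ++ t.2) =
                (x :: t.1) :: chop axis tolerance t.2 := by rw [← hl']; exact hchop
            rw [hchop2]
            congr 1
            · -- first slice is the chain
              rw [PySem.List.slice_zero_start, PySem.List.slice_to _ (by omega)]
              have : k.toNat = (x :: t.1).length := by omega
              rw [this, List.take_left]
            · -- remaining slices are bView of the rest
              have hrlen : t.2.length ≤ m := by
                have := takeChain_snd_length axis tolerance x xs
                rw [← ht] at this
                simp at hl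
                omega
              rw [← ih t.2 hrlen hrne, bView, ← hcr]
              apply List.map_congr_left
              intro ab hab
              obtain ⟨ha, hb⟩ := List.of_mem_zip hab
              have ha0 : 0 ≤ ab.1 := by
                rcases List.mem_cons.mp ha with h | h
                · omega
                · have := cutsOf_pos axis tolerance t.2 ab.1 (hcr ▸ h); omega
              have hb0 : 0 ≤ ab.2 := by
                rcases List.mem_append.mp hb with h | h
                · have := cutsOf_pos axis tolerance t.2 ab.2 (hcr ▸ h); omega
                · simp at h; omega
              simp only [Function.comp_apply]
              exact slice_append_shift (x :: t.1) t.2 ab.1 ab.2 ha0 hb0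

theorem ports_agree (coords : List (List Int)) (axis : Int) (tolerance : Int) :
    group_by_axis coords axis tolerance = group_by_axis_alt coords axis tolerance := by
  by_cases h : coords = []
  · subst h
    have hs : PySem.List.sorted ([] : List (List Int)) (fun x => axKey axis x) false = [] :=
      (PySem.List.sorted_eq_nil_iff _ _ _).mpr rfl
    rw [a_eq_chop, hs, group_by_axis_alt]
    simp [chop]
  · rw [a_eq_chop, alt_eq_bView coords axis tolerance h]
    have hne : PySem.List.sorted coords (fun p => axKey axis p) false ≠ [] := by
      rw [Ne, PySem.List.sorted_eq_nil_iff]; exact h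
    exact (bView_eq_chop axis tolerance _ _ le_rfl hne).symm

-- ===== VERDICT (by name: the statement is the Claim_ definition above) =====
theorem group_by_axis_spec : Claim_equal_group_by_axis := by
  intro coords axis tolerance _ _
  unfold Spec_group_by_axis
  exact ports_agree coords axis tolerance
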